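-- pv_equiv track=rewrite | github.com/maku1560/stepn_weather_bot | main.py | categorize_weather
-- ===== SOURCE A (Python) =====
-- def categorize_weather(rows):
--     codes = [r["weathercode"] for r in rows]
--     if any(c in (95,96,99) for c in codes):
--         return "thunder"  # 雷（追いコメントのみで扱う：主文は rain と似せる）
--     if any(c in (71,73,75,77,85,86) for c in codes):
--         return "snow"
--     if any(c in (51,53,55,61,63,65,66,67,80,81,82) for c in codes):
--         return "rain"
--     if all(c in (0,1,2) for c in codes):
--         return "sunny"
--     return "cloudy"
-- ===== SOURCE B (Python) =====
-- CAT = {95: "thunder", 96: "thunder", 99: "thunder",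
--        71: "snow", 73: "snow", 75: "snow", 77: "snow", 85: "snow", 86: "snow",
--        51: "rain", 53: "rain", 55: "rain", 61: "rain", 63: "rain", 65: "rain",
--        66: "rain", 67: "rain", 80: "rain", 81: "rain", 82: "rain",
--        0: "sunny", 1: "sunny", 2: "sunny"}
--
-- def categorize_weather(rows):
--     codes = [r["weathercode"] for r in rows]
--     seen = set()
--     all_sunny = True
--     for c in codes:
--         cat = CAT.get(c, "other")
--         seen.add(cat)
--         if cat != "sunny":
--             all_sunny = False
--     for cat in ("thunder", "snow", "rain"):
--         if cat in seen:
--             return cat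
--     return "sunny" if all_sunny else "cloudy"
-- ===== Notes on version B (the rewrite author's own statement) =====
-- stated objective: alternative
-- what changed: A scans the codes list up to four times with tuple-membership tests; B builds one code-to-category table and makes a single pass accumulating the set of categories present plus an all-sunny flag, then decides by priority.
import Mathlib
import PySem

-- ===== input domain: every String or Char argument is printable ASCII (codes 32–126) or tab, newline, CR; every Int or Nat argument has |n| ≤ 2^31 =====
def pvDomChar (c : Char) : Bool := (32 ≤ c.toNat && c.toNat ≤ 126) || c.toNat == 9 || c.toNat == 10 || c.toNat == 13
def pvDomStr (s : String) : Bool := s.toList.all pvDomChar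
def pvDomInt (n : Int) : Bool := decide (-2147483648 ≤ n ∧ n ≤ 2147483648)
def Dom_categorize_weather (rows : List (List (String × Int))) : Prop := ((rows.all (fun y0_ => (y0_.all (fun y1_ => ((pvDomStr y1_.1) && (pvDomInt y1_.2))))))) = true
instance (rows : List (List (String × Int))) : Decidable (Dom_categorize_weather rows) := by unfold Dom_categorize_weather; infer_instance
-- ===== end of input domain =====

-- B replaces A's four repeated membership scans by one table-driven pass; equivalence of return values.

-- ===== PORT A =====
-- r["weathercode"]; Pre_ guarantees the key is present, so getD 0 is never the default.
def pvKeyGet (r : List (String × Int)) : Int :=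
  ((PySem.Dict.mk r).get? "weathercode").getD 0

def categorize_weather (rows : List (List (String × Int))) : String :=
  let codes := rows.map pvKeyGet
  if codes.any (fun c => c == 95 || c == 96 || c == 99) then "thunder"
  else if codes.any (fun c => c == 71 || c == 73 || c == 75 || c == 77 || c == 85 || c == 86) then "snow"
  else if codes.any (fun c => c == 51 || c == 53 || c == 55 || c == 61 || c == 63 || c == 65 || c == 66 || c == 67 || c == 80 || c == 81 || c == 82) then "rain"
  else if codes.all (fun c => c == 0 || c == 1 || c == 2) then "sunny"
  else "cloudy"

-- ===== PORT B =====
-- the module-level CAT table of Source B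
def pvCAT : PySem.Dict Int String :=
  PySem.Dict.mk [(95, "thunder"), (96, "thunder"), (99, "thunder"),
    (71, "snow"), (73, "snow"), (75, "snow"), (77, "snow"), (85, "snow"), (86, "snow"),
    (51, "rain"), (53, "rain"), (55, "rain"), (61, "rain"), (63, "rain"), (65, "rain"),
    (66, "rain"), (67, "rain"), (80, "rain"), (81, "rain"), (82, "rain"),
    (0, "sunny"), (1, "sunny"), (2, "sunny")]

def categorize_weather_alt (rows : List (List (String × Int))) : String :=
  let codes := rows.map pvKeyGet
  let st := codes.foldl
    (fun (st : PySem.Set String × Bool) c =>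
      let cat := pvCAT.getD c "other"
      (PySem.Set.add st.1 cat, if cat ≠ "sunny" then false else st.2))
    (PySem.Set.empty, true)
  if PySem.Set.contains st.1 "thunder" then "thunder"
  else if PySem.Set.contains st.1 "snow" then "snow"
  else if PySem.Set.contains st.1 "rain" then "rain"
  else if st.2 then "sunny" else "cloudy"

-- ===== PRECONDITION & SPEC =====
-- Pre_ excludes rows lacking the "weathercode" key, on which both Pythons raise KeyError.
def Pre_categorize_weather (rows : List (List (String × Int))) : Prop :=
  (rows.all (fun r => r.any (fun p => p.1 == "weathercode"))) = true
instance (rows : List (List (String × Int))) : Decidable (Pre_categorize_weather rows) := by unfold Pre_categorize_weather; infer_instance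
def pvWitness_categorize_weather : (List (List (String × Int))) := [[("weathercode", 0)], [("weathercode", 63)]]

def Spec_categorize_weather (rows : List (List (String × Int))) (out : String) : Prop := out = categorize_weather_alt rows
instance (rows : List (List (String × Int))) (out : String) : Decidable (Spec_categorize_weather rows out) := by unfold Spec_categorize_weather; infer_instance

-- ===== CLAIM (what is proved, stated in full; the proofs are below) =====
def Claim_equal_categorize_weather : Prop := ∀ (rows : List (List (String × Int))), Dom_categorize_weather rows → Pre_categorize_weather rows → Spec_categorize_weather rows (categorize_weather rows)

-- ===== LEMMAS AND PROOFS =====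

theorem catOf_eq (c : Int) :
    pvCAT.getD c "other" =
      (if c == 95 || c == 96 || c == 99 then "thunder"
       else if c == 71 || c == 73 || c == 75 || c == 77 || c == 85 || c == 86 then "snow"
       else if c == 51 || c == 53 || c == 55 || c == 61 || c == 63 || c == 65 || c == 66 || c == 67 || c == 80 || c == 81 || c == 82 then "rain"
       else if c == 0 || c == 1 || c == 2 then "sunny" else "other") := by
  by_cases h0 : c = 95
  · subst h0; decide
  by_cases h1 : c = 96
  · subst h1; decide
  by_cases h2 : c = 99
  · subst h2; decide
  by_cases h3 : c = 71
  · subst h3; decide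
  by_cases h4 : c = 73
  · subst h4; decide
  by_cases h5 : c = 75
  · subst h5; decide
  by_cases h6 : c = 77
  · subst h6; decide
  by_cases h7 : c = 85
  · subst h7; decide
  by_cases h8 : c = 86
  · subst h8; decide
  by_cases h9 : c = 51
  · subst h9; decide
  by_cases h10 : c = 53
  · subst h10; decide
  by_cases h11 : c = 55
  · subst h11; decide
  by_cases h12 : c = 61
  · subst h12; decide
  by_cases h13 : c = 63
  · subst h13; decide
  by_cases h14 : c = 65
  · subst h14; decide
  by_cases h15 : c = 66
  · subst h15; decide
  by_cases h16 : c = 67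
  · subst h16; decide
  by_cases h17 : c = 80
  · subst h17; decide
  by_cases h18 : c = 81
  · subst h18; decide
  by_cases h19 : c = 82
  · subst h19; decide
  by_cases h20 : c = 0
  · subst h20; decide
  by_cases h21 : c = 1
  · subst h21; decide
  by_cases h22 : c = 2
  · subst h22; decide
  simp [pvCAT, PySem.Dict.getD, PySem.Dict.get?_mk_cons, h0, h1, h2, h3, h4, h5, h6, h7, h8, h9, h10, h11, h12, h13, h14, h15, h16, h17, h18, h19, h20, h21, h22, Ne.symm h0, Ne.symm h1, Ne.symm h2, Ne.symm h3, Ne.symm h4, Ne.symm h5, Ne.symm h6, Ne.symm h7, Ne.symm h8, Ne.symm h9, Ne.symm h10, Ne.symm h11, Ne.symm h12, Ne.symm h13, Ne.symm h14, Ne.symm h15, Ne.symm h16, Ne.symm h17, Ne.symm h18, Ne.symm h19, Ne.symm h20, Ne.symm h21, Ne.symm h22]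
  simp [PySem.Dict.get?]

theorem thunder_eq (c : Int) :
    (pvCAT.getD c "other" == "thunder") = (c == 95 || c == 96 || c == 99) := by
  rw [catOf_eq]; split_ifs; all_goals simp_all

theorem snow_eq (c : Int) :
    (pvCAT.getD c "other" == "snow") = (c == 71 || c == 73 || c == 75 || c == 77 || c == 85 || c == 86) := by
  rw [catOf_eq]; split_ifs <;> simp_all <;> omega

theorem rain_eq (c : Int) :
    (pvCAT.getD c "other" == "rain") = (c == 51 || c == 53 || c == 55 || c == 61 || c == 63 || c == 65 || c == 66 || c == 67 || c == 80 || c == 81 || c == 82) := by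
  rw [catOf_eq]; split_ifs <;> simp_all <;> omega

theorem sunny_iff (c : Int) :
    (pvCAT.getD c "other" = "sunny") ↔ (c == 0 || c == 1 || c == 2) = true := by
  rw [catOf_eq]; split_ifs <;> simp_all <;> omega

-- membership in the set accumulated by B's loop
theorem mem_foldl_add (f : Int → String) (codes : List Int) (s : PySem.Set String) (x : String) :
    (x ∈ codes.foldl (fun s c => PySem.Set.add s (f c)) s) ↔ (x ∈ s ∨ ∃ c ∈ codes, f c = x) := by
  induction codes generalizing s with
  | nil => simp
  | cons c t ih => simp [ih, PySem.Set.mem_add]; tauto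

theorem contains_fold (codes : List Int) (x : String) :
    PySem.Set.contains (codes.foldl (fun s c => PySem.Set.add s (pvCAT.getD c "other")) PySem.Set.empty) x
      = codes.any (fun c => pvCAT.getD c "other" == x) := by
  rw [Bool.eq_iff_iff, PySem.Set.contains_iff, mem_foldl_add (fun c => pvCAT.getD c "other")]
  simp [PySem.Set.empty]

-- B's all-sunny flag is A's trailing 'all' test
theorem foldl_sunny (codes : List Int) (b : Bool) :
    codes.foldl (fun b c => if pvCAT.getD c "other" ≠ "sunny" then false else b) b
      = (b && codes.all (fun c => c == 0 || c == 1 || c == 2)) := by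
  induction codes generalizing b with
  | nil => simp
  | cons c t ih =>
    rw [List.foldl_cons, ih]
    by_cases h : pvCAT.getD c "other" = "sunny"
    · have hc : (c == 0 || c == 1 || c == 2) = true := (sunny_iff c).mp h
      simp [h, hc]
    · have hc : (c == 0 || c == 1 || c == 2) = false := by
        rcases Bool.eq_false_or_eq_true (c == 0 || c == 1 || c == 2) with ht | hf
        · exact absurd ((sunny_iff c).mpr ht) h
        · exact hf
      simp [h, hc]

theorem categorize_weather_spec : Claim_equal_categorize_weather := by
  intro rows _ _
  unfold Spec_categorize_weather categorize_weather categorize_weather_alt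
  dsimp only
  rw [PySem.List.foldl_prod_mk
    (f := fun s c => PySem.Set.add s (pvCAT.getD c "other"))
    (g := fun b c => if pvCAT.getD c "other" ≠ "sunny" then false else b)]
  rw [contains_fold, contains_fold, contains_fold, foldl_sunny]
  rw [PySem.List.any_congr_mem (fun c _ => thunder_eq c),
      PySem.List.any_congr_mem (fun c _ => snow_eq c),
      PySem.List.any_congr_mem (fun c _ => rain_eq c)]
  simp
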